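-- pv_equiv track=rewrite | github.com/dawoodaijaz97/Leetcode | partition-array-for-maximum-xor-and-and/solution.py | solve
-- ===== SOURCE A (Python) =====
-- from typing import List
--
-- def solve(nums: List[int]) -> int:
--     def xor_of_all(nums: List[int]) -> int:
--         result = 0
--         for num in nums:
--             result ^= num
--         return result
--
--     def and_of_all(nums: List[int]) -> int:
--         if not nums:
--             return 0
--         result = nums[0]
--         for num in nums[1:]:
--             result &= num
--         return result
--
--     max_value = 0
--     n = len(nums)
--
--     # Iterate over all possible partitions of the array into three parts
--     for i in range(n + 1):
--         for j in range(i, n + 1):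
--             A = nums[:i]
--             B = nums[i:j]
--             C = nums[j:]
--
--             xor_A = xor_of_all(A)
--             and_B = and_of_all(B)
--             xor_C = xor_of_all(C)
--
--             current_value = xor_A + and_B + xor_C
--             max_value = max(max_value, current_value)
--
--     return max_value
-- ===== SOURCE B (Python) =====
-- from typing import List
--
-- def solve(nums: List[int]) -> int:
--     # O(n^2): sweep the left split i keeping xor(nums[:i]) incrementally;
--     # for each i extend the middle part one element at a time, maintaining its
--     # running AND and the xor of the remaining right part.
--     total = 0
--     for v in nums:
--         total ^= v
--     best = 0
--     xa = 0          # xor of nums[:i]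
--     suffix = nums   # nums[i:]
--     while True:
--         cand = xa + (xa ^ total)        # middle part empty (j == i)
--         if cand > best:
--             best = cand
--         xc = xa ^ total                 # xor of nums[j:] as j grows
--         ab = None                       # running AND of the middle part
--         for v in suffix:
--             xc ^= v
--             ab = v if ab is None else ab & v
--             cand = xa + ab + xc
--             if cand > best:
--                 best = cand
--         if not suffix:
--             return best
--         xa ^= suffix[0]
--         suffix = suffix[1:]
-- ===== Notes on version B (the rewrite author's own statement) =====
-- stated objective: faster
-- what changed: Instead of re-slicing the array and re-folding all three parts for every split pair (i, j), B sweeps the left split once keeping a running prefix xor, and for each left split extends the middle part one element at a time with a running AND and a running suffix xor.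
import Mathlib
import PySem

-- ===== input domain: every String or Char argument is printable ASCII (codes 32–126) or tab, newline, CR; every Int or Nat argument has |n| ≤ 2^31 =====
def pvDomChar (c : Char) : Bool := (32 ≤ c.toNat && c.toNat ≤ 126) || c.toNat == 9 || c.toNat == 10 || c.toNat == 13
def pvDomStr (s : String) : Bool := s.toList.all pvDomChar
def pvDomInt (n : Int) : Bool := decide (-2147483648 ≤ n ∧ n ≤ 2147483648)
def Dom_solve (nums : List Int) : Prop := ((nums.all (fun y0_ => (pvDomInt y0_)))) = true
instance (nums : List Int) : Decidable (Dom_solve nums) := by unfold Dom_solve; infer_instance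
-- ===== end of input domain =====

-- B replaces A's re-slicing and re-folding of all three parts for every split pair (i, j)
-- by one sweep of the left split keeping a running prefix xor, extending the middle part
-- element by element with a running AND and a running suffix xor (objective: faster).

-- ===== PORT A =====
def xorOfAll (nums : List Int) : Int :=
  nums.foldl (fun result num => PySem.Int.bxor result num) 0

def andOfAll (nums : List Int) : Int :=
  match nums with
  | [] => 0
  | h :: t => t.foldl (fun result num => PySem.Int.band result num) h

def solve (nums : List Int) : Int :=
  let n : Int := nums.length
  (PySem.List.pyRange 0 (n + 1) 1).foldl (fun max_value i =>
    (PySem.List.pyRange i (n + 1) 1).foldl (fun max_value j =>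
      let A := PySem.List.slice nums none (some i)
      let B := PySem.List.slice nums (some i) (some j)
      let C := PySem.List.slice nums (some j) none
      max max_value (xorOfAll A + andOfAll B + xorOfAll C)) max_value) 0

-- ===== PORT B =====
-- inner `for v in suffix` loop of Source B: state = (best, xc, ab)
def altInner (xa : Int) (suffix : List Int) (st : Int × Int × Option Int) : Int × Int × Option Int :=
  suffix.foldl (fun st v =>
    let xc := PySem.Int.bxor st.2.1 v
    let ab : Int := match st.2.2 with
      | none => v
      | some a => PySem.Int.band a v
    let cand := xa + ab + xc
    (if cand > st.1 then cand else st.1, xc, some ab)) st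

-- outer `while True` loop of Source B, advancing through the suffixes of nums
def altOuter (total : Int) (xa : Int) (suffix : List Int) (best : Int) : Int :=
  let cand := xa + PySem.Int.bxor xa total
  let best1 := if cand > best then cand else best
  let best2 := (altInner xa suffix (best1, PySem.Int.bxor xa total, none)).1
  match suffix with
  | [] => best2
  | v :: rest => altOuter total (PySem.Int.bxor xa v) rest best2

def solve_alt (nums : List Int) : Int :=
  let total := nums.foldl (fun t v => PySem.Int.bxor t v) 0
  altOuter total 0 nums 0

-- ===== PRECONDITION & SPEC =====
def Spec_solve (nums : List Int) (out : Int) : Prop := out = solve_alt nums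
instance (nums : List Int) (out : Int) : Decidable (Spec_solve nums out) := by unfold Spec_solve; infer_instance

-- ===== CLAIM (what is proved, stated in full; the proofs are below) =====
def Claim_equal_solve : Prop := ∀ (nums : List Int), Dom_solve nums → Spec_solve nums (solve nums)

-- ===== LEMMAS AND PROOFS =====

theorem bxor_eq_xor (a b : Int) : PySem.Int.bxor a b = Int.xor a b := by
  rcases a with m | m <;> rcases b with n | n <;>
    simp [PySem.Int.bxor, Int.xor, Int.negSucc_eq] <;> omega

theorem intXor_assoc (a b c : Int) : Int.xor (Int.xor a b) c = Int.xor a (Int.xor b c) := by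
  rcases a with m | m <;> rcases b with n | n <;> rcases c with k | k <;>
    simp [Int.xor, Nat.xor_assoc]

theorem bxor_assoc (a b c : Int) :
    PySem.Int.bxor (PySem.Int.bxor a b) c = PySem.Int.bxor a (PySem.Int.bxor b c) := by
  simp [bxor_eq_xor, intXor_assoc]

theorem zero_bxor (a : Int) : PySem.Int.bxor 0 a = a := by
  rw [PySem.Int.bxor_comm]; simp

theorem bxor_cancel_left (a b : Int) : PySem.Int.bxor a (PySem.Int.bxor a b) = b := by
  rw [← bxor_assoc]; simp [zero_bxor]

theorem foldl_bxor_eq (l : List Int) (a : Int) :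
    l.foldl (fun r v => PySem.Int.bxor r v) a
      = PySem.Int.bxor a (l.foldl (fun r v => PySem.Int.bxor r v) 0) := by
  induction l generalizing a with
  | nil => simp
  | cons v t ih =>
    simp only [List.foldl_cons]
    rw [ih (PySem.Int.bxor a v), ih (PySem.Int.bxor 0 v), zero_bxor, bxor_assoc]

theorem xorOfAll_cons (v : Int) (l : List Int) :
    xorOfAll (v :: l) = PySem.Int.bxor v (xorOfAll l) := by
  simp only [xorOfAll, List.foldl_cons]
  rw [foldl_bxor_eq, zero_bxor]

theorem xorOfAll_append (l₁ l₂ : List Int) :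
    xorOfAll (l₁ ++ l₂) = PySem.Int.bxor (xorOfAll l₁) (xorOfAll l₂) := by
  simp only [xorOfAll, List.foldl_append]
  rw [foldl_bxor_eq]

theorem bxor_cons_cancel (v : Int) (l : List Int) :
    PySem.Int.bxor (xorOfAll (v :: l)) v = xorOfAll l := by
  rw [xorOfAll_cons, PySem.Int.bxor_comm, bxor_cancel_left]

theorem andOfAll_append_singleton (mid : List Int) (v : Int) (h : mid ≠ []) :
    andOfAll (mid ++ [v]) = PySem.Int.band (andOfAll mid) v := by
  rcases mid with _ | ⟨h0, t⟩
  · exact absurd rfl h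
  · simp only [List.cons_append, andOfAll, List.foldl_append, List.foldl_cons, List.foldl_nil]

theorem if_gt_max (b c : Int) : (if c > b then c else b) = max b c := by
  rw [max_def]; split_ifs <;> omega

-- B's Option-valued running AND of the middle part, as a function of the middle part
def abOf : List Int → Option Int
  | [] => none
  | h :: t => some (andOfAll (h :: t))

theorem abOf_step (mid : List Int) (v : Int) :
    (match abOf mid with
      | none => v
      | some a => PySem.Int.band a v) = andOfAll (mid ++ [v]) := by
  rcases mid with _ | ⟨h, t⟩
  · simp [abOf, andOfAll]
  · rw [andOfAll_append_singleton _ _ (by simp)]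
    simp [abOf]

theorem slice_pre (pre rest : List Int) :
    PySem.List.slice (pre ++ rest) none (some (pre.length : Int)) = pre := by
  rw [PySem.List.slice_to_natCast, List.take_left]

theorem slice_mid (pre mid suf : List Int) :
    PySem.List.slice (pre ++ mid ++ suf) (some (pre.length : Int))
      (some ((pre.length + mid.length : Nat) : Int)) = mid := by
  rw [PySem.List.slice_natCast, List.append_assoc, List.drop_left]
  simp

theorem slice_suf (pre suf : List Int) :
    PySem.List.slice (pre ++ suf) (some ((pre.length : Nat) : Int)) none = suf := by
  rw [PySem.List.slice_from_natCast, List.drop_left]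

-- one inner sweep of B (over `suf`, middle part so far `mid`) computes exactly
-- A's inner fold over j = |pre|+|mid|+1 .. n
theorem inner_eq (pre mid suf : List Int) (best : Int) :
    (altInner (xorOfAll pre) suf (best, xorOfAll suf, abOf mid)).1
    = (PySem.List.pyRange (((pre.length + mid.length : Nat) : Int) + 1) ((((pre ++ mid ++ suf).length : Nat) : Int) + 1) 1).foldl
        (fun mv j => max mv (xorOfAll pre
            + andOfAll (PySem.List.slice (pre ++ mid ++ suf) (some (pre.length : Int)) (some j))
            + xorOfAll (PySem.List.slice (pre ++ mid ++ suf) (some j) none))) best := by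
  induction suf generalizing mid best with
  | nil =>
    rw [PySem.List.pyRange_one_eq_nil (by simp)]
    simp [altInner]
  | cons v rest ih =>
    have hlt : (((pre.length + mid.length : Nat) : Int)) + 1 < (((pre ++ mid ++ (v :: rest)).length : Nat) : Int) + 1 := by
      simp only [List.length_append, List.length_cons]
      push_cast; omega
    rw [PySem.List.pyRange_one_cons hlt]
    simp only [List.foldl_cons]
    have hj : (((pre.length + mid.length : Nat) : Int)) + 1 = ((pre.length + (mid ++ [v]).length : Nat) : Int) := by
      simp only [List.length_append, List.length_cons, List.length_nil]
      push_cast; ring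
    have hre : pre ++ mid ++ (v :: rest) = pre ++ (mid ++ [v]) ++ rest := by simp
    have hmidslice : PySem.List.slice (pre ++ mid ++ (v :: rest)) (some (pre.length : Int))
        (some ((((pre.length + mid.length : Nat) : Int)) + 1)) = mid ++ [v] := by
      rw [hj, hre, slice_mid]
    have hsufslice : PySem.List.slice (pre ++ mid ++ (v :: rest))
        (some ((((pre.length + mid.length : Nat) : Int)) + 1)) none = rest := by
      rw [hj, hre]
      have h2 : ((pre.length + (mid ++ [v]).length : Nat) : Int) = (((pre ++ (mid ++ [v])).length : Nat) : Int) := by simp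
      rw [h2, ← List.append_assoc, slice_suf]
    -- unfold one step of B's inner fold
    simp only [altInner, List.foldl_cons]
    rw [← altInner]
    have hxc : PySem.Int.bxor (xorOfAll (v :: rest)) v = xorOfAll rest := bxor_cons_cancel v rest
    rw [hmidslice, hsufslice]
    simp only [hxc, abOf_step]
    have hab : (some (andOfAll (mid ++ [v]))) = abOf (mid ++ [v]) := by
      rcases mid with _ | ⟨h, t⟩ <;> simp [abOf]
    rw [if_gt_max, hab, hre]
    have hcast : ((((pre.length + mid.length : Nat) : Int)) + 1) + 1
        = ((pre.length + (mid ++ [v]).length : Nat) : Int) + 1 := by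
      simp only [List.length_append, List.length_cons, List.length_nil]
      push_cast; ring
    rw [hcast]
    exact ih (mid ++ [v]) _

-- B's outer loop from suffix `suf` computes A's outer fold over i = |pre| .. n
theorem outer_eq (pre suf : List Int) (best : Int) :
    altOuter (xorOfAll (pre ++ suf)) (xorOfAll pre) suf best
    = (PySem.List.pyRange ((pre.length : Nat) : Int) ((((pre ++ suf).length : Nat) : Int) + 1) 1).foldl
        (fun mv i => (PySem.List.pyRange i ((((pre ++ suf).length : Nat) : Int) + 1) 1).foldl
          (fun mv j => max mv (xorOfAll (PySem.List.slice (pre ++ suf) none (some i))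
              + andOfAll (PySem.List.slice (pre ++ suf) (some i) (some j))
              + xorOfAll (PySem.List.slice (pre ++ suf) (some j) none))) mv) best := by
  induction suf generalizing pre best with
  | nil =>
    simp only [List.append_nil]
    rw [PySem.List.pyRange_one_cons (by omega), PySem.List.pyRange_one_eq_nil (le_refl _)]
    simp only [List.foldl_cons, List.foldl_nil]
    rw [PySem.List.pyRange_one_cons (by omega), PySem.List.pyRange_one_eq_nil (le_refl _)]
    simp only [List.foldl_cons, List.foldl_nil]
    have h1 : PySem.List.slice pre none (some ((pre.length : Nat) : Int)) = pre := by
      rw [PySem.List.slice_to_natCast, List.take_length]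
    have h2 : PySem.List.slice pre (some ((pre.length : Nat) : Int)) (some ((pre.length : Nat) : Int)) = [] := by
      rw [PySem.List.slice_natCast]; simp
    have h3 : PySem.List.slice pre (some ((pre.length : Nat) : Int)) none = [] := by
      rw [PySem.List.slice_from_natCast]; simp
    rw [h1, h2, h3]
    simp only [altOuter, altInner, List.foldl_nil, PySem.Int.bxor_self, andOfAll, xorOfAll,
      add_zero]
    rw [if_gt_max]
  | cons v rest ih =>
    -- one step of B's outer loop
    simp only [altOuter]
    have hN : ((((pre ++ (v :: rest)).length : Nat) : Int)) = ((pre.length : Nat) : Int) + 1 + ((rest.length : Nat) : Int) := by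
      simp only [List.length_append, List.length_cons]; push_cast; ring
    have hxc : PySem.Int.bxor (xorOfAll pre) (xorOfAll (pre ++ (v :: rest))) = xorOfAll (v :: rest) := by
      rw [xorOfAll_append, bxor_cancel_left]
    -- A's outer range starts at i = |pre|
    rw [PySem.List.pyRange_one_cons (by rw [hN]; omega)]
    simp only [List.foldl_cons]
    -- A's inner range for i = |pre| starts at j = |pre|
    rw [PySem.List.pyRange_one_cons (by rw [hN]; omega)]
    simp only [List.foldl_cons]
    have h1 : PySem.List.slice (pre ++ (v :: rest)) none (some ((pre.length : Nat) : Int)) = pre :=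
      slice_pre pre (v :: rest)
    have h2 : PySem.List.slice (pre ++ (v :: rest)) (some ((pre.length : Nat) : Int)) (some ((pre.length : Nat) : Int)) = [] := by
      rw [PySem.List.slice_natCast]; simp
    have h3 : PySem.List.slice (pre ++ (v :: rest)) (some ((pre.length : Nat) : Int)) none = v :: rest :=
      slice_suf pre (v :: rest)
    rw [h1, h2, h3]
    -- the j = |pre| term is B's empty-middle candidate
    have hfirst : max best (xorOfAll pre + andOfAll [] + xorOfAll (v :: rest))
        = (if xorOfAll pre + PySem.Int.bxor (xorOfAll pre) (xorOfAll (pre ++ (v :: rest))) > best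
            then xorOfAll pre + PySem.Int.bxor (xorOfAll pre) (xorOfAll (pre ++ (v :: rest))) else best) := by
      rw [hxc, if_gt_max]
      simp [andOfAll]
    rw [← hfirst]
    -- the rest of the inner fold is B's inner sweep (middle part starts empty)
    have hinner := inner_eq pre [] (v :: rest) (max best (xorOfAll pre + andOfAll [] + xorOfAll (v :: rest)))
    simp only [List.append_nil, List.length_nil, Nat.add_zero, abOf] at hinner
    rw [hxc, ← hinner]
    -- the remaining outer iterations are B's recursive call with pre ++ [v]
    have hxa : PySem.Int.bxor (xorOfAll pre) v = xorOfAll (pre ++ [v]) := by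
      rw [xorOfAll_append]
      congr 1
      simp [xorOfAll, zero_bxor]
    have hih := ih (pre ++ [v])
      ((altInner (xorOfAll pre) (v :: rest)
        (max best (xorOfAll pre + andOfAll [] + xorOfAll (v :: rest)),
          xorOfAll (v :: rest), none)).1)
    have hres : pre ++ [v] ++ rest = pre ++ (v :: rest) := by simp
    have hlen : (((pre ++ [v]).length : Nat) : Int) = ((pre.length : Nat) : Int) + 1 := by
      simp
    rw [hres, hlen, ← hxa] at hih
    exact hih

theorem solve_spec : Claim_equal_solve := by
  intro nums _
  unfold Spec_solve
  have h := outer_eq [] nums 0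
  simp only [List.nil_append, List.length_nil, Nat.cast_zero] at h
  have hx0 : xorOfAll ([] : List Int) = 0 := rfl
  rw [hx0] at h
  show solve nums = solve_alt nums
  simp only [solve, solve_alt]
  exact h.symm
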